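-- pv_equiv track=rewrite | github.com/kusotom/FSU | backend/app/services/access_control.py | expand_permissions
-- ===== SOURCE A (Python) =====
-- PERMISSION_ALIASES: dict[str, set[str]] = {
--     "alarm.handle": {"alarm.ack", "alarm.close"},
--     "alarm.ack": {"alarm.handle"},
--     "alarm.close": {"alarm.handle"},
--     "site.manage": {"site.create", "site.update"},
--     "site.create": {"site.manage"},
--     "site.update": {"site.manage"},
--     "rule.view": {"alarm_rule.template.view", "alarm_rule.tenant.view"},
--     "rule.manage": {
--         "rule.view",
--         "alarm_rule.template.view",
--         "alarm_rule.template.manage",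
--         "alarm_rule.tenant.view",
--         "alarm_rule.tenant.manage",
--     },
--     "alarm_rule.template.view": {"rule.view"},
--     "alarm_rule.tenant.view": {"rule.view"},
--     "alarm_rule.template.manage": {"rule.manage", "rule.view"},
--     "alarm_rule.tenant.manage": {"rule.manage", "rule.view"},
--     "notify.view": {
--         "notify.channel.view",
--         "notify.policy.view",
--         "notify.receiver.view",
--         "notify.group.view",
--         "notify.rule.view",
--         "notify.oncall.view",
--         "notify.push_log.view",
--     },
--     "notify.manage": {
--         "notify.view",
--         "notify.channel.view",
--         "notify.channel.manage",
--         "notify.policy.view",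
--         "notify.policy.manage",
--         "notify.receiver.view",
--         "notify.receiver.manage",
--         "notify.group.view",
--         "notify.group.manage",
--         "notify.rule.view",
--         "notify.rule.manage",
--         "notify.oncall.view",
--         "notify.oncall.manage",
--         "notify.push_log.view",
--         "notify.push_log.retry",
--     },
--     "notify.channel.view": {"notify.view"},
--     "notify.policy.view": {"notify.view"},
--     "notify.receiver.view": {"notify.view"},
--     "notify.group.view": {"notify.view"},
--     "notify.rule.view": {"notify.view"},
--     "notify.oncall.view": {"notify.view"},
--     "notify.push_log.view": {"notify.view"},
--     "notify.channel.manage": {"notify.manage", "notify.view"},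
--     "notify.policy.manage": {"notify.manage", "notify.view"},
--     "notify.receiver.manage": {"notify.manage", "notify.view"},
--     "notify.group.manage": {"notify.manage", "notify.view"},
--     "notify.rule.manage": {"notify.manage", "notify.view"},
--     "notify.oncall.manage": {"notify.manage", "notify.view"},
--     "notify.push_log.retry": {"notify.manage", "notify.view"},
--     "user.manage_company": {"user.view", "user.manage", "audit.view"},
--     "user.view": {"user.manage_company"},
--     "user.manage": {"user.manage_company"},
-- }
--
-- def expand_permissions(raw_permissions: set[str] | list[str]) -> set[str]:
--     expanded = {item for item in raw_permissions if item}
--     changed = True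
--     while changed:
--         changed = False
--         for key in list(expanded):
--             additions = PERMISSION_ALIASES.get(key, set())
--             if not additions.issubset(expanded):
--                 expanded.update(additions)
--                 changed = True
--     return expanded
-- ===== SOURCE B (Python) =====
-- ALIAS_GROUPS: list[tuple[tuple[str, ...], tuple[str, ...]]] = [
--     (("alarm.handle",),
--      ("alarm.ack", "alarm.close")),
--     (("alarm.ack", "alarm.close"),
--      ("alarm.handle",)),
--     (("site.manage",),
--      ("site.create", "site.update")),
--     (("site.create", "site.update"),
--      ("site.manage",)),
--     (("rule.view",),
--      ("alarm_rule.template.view", "alarm_rule.tenant.view")),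
--     (("rule.manage",),
--      ("rule.view", "alarm_rule.template.view", "alarm_rule.template.manage", "alarm_rule.tenant.view", "alarm_rule.tenant.manage")),
--     (("alarm_rule.template.view", "alarm_rule.tenant.view"),
--      ("rule.view",)),
--     (("alarm_rule.template.manage", "alarm_rule.tenant.manage"),
--      ("rule.manage", "rule.view")),
--     (("notify.view",),
--      ("notify.channel.view", "notify.policy.view", "notify.receiver.view", "notify.group.view", "notify.rule.view", "notify.oncall.view", "notify.push_log.view")),
--     (("notify.manage",),
--      ("notify.view", "notify.channel.view", "notify.channel.manage", "notify.policy.view", "notify.policy.manage", "notify.receiver.view", "notify.receiver.manage", "notify.group.view", "notify.group.manage", "notify.rule.view", "notify.rule.manage", "notify.oncall.view", "notify.oncall.manage", "notify.push_log.view", "notify.push_log.retry")),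
--     (("notify.channel.view", "notify.policy.view", "notify.receiver.view", "notify.group.view", "notify.rule.view", "notify.oncall.view", "notify.push_log.view"),
--      ("notify.view",)),
--     (("notify.channel.manage", "notify.policy.manage", "notify.receiver.manage", "notify.group.manage", "notify.rule.manage", "notify.oncall.manage", "notify.push_log.retry"),
--      ("notify.manage", "notify.view")),
--     (("user.manage_company",),
--      ("user.view", "user.manage", "audit.view")),
--     (("user.view", "user.manage"),
--      ("user.manage_company",)),
-- ]
--
-- ALIAS_GRAPH: dict[str, tuple[str, ...]] = {
--     key: aliases for keys, aliases in ALIAS_GROUPS for key in keys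
-- }
--
-- def expand_permissions(raw_permissions):
--     # Level-by-level BFS over the alias graph: each permission is visited once,
--     # when it first enters the frontier; no repeated sweeps over the whole set.
--     seen: set[str] = set()
--     frontier: list[str] = []
--     for item in raw_permissions:
--         if item and item not in seen:
--             seen.add(item)
--             frontier.append(item)
--     while frontier:
--         nxt: list[str] = []
--         for perm in frontier:
--             for alias in ALIAS_GRAPH.get(perm, ()):
--                 if alias not in seen:
--                     seen.add(alias)
--                     nxt.append(alias)
--         frontier = nxt
--     return seen
-- ===== Notes on version B (the rewrite author's own statement) =====
-- stated objective: alternative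
-- what changed: Replaced A's repeat-until-no-change sweeps over the whole set (a changed flag and a full re-scan every round) by a level-by-level BFS over the alias graph — only the frontier of newly added permissions is scanned, so each permission is visited exactly once — with the alias table stored as deduplicated alias groups flattened into the adjacency dict.
import Mathlib
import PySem

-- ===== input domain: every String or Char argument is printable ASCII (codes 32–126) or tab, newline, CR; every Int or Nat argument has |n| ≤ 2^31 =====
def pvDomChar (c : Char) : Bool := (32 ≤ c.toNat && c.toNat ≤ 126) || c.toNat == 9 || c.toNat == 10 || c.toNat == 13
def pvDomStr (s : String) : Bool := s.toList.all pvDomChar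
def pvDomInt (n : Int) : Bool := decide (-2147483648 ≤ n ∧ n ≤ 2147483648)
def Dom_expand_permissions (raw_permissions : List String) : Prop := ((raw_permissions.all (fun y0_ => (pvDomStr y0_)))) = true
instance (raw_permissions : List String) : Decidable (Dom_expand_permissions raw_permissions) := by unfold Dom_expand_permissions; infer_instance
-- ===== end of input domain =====

-- B replaces A's repeat-until-unchanged sweeps over the whole set by a level-by-level
-- BFS over the alias graph (each permission visited once); return values agree everywhere.

-- ===== PORT A =====
-- PERMISSION_ALIASES (A's module constant: dict of set literals)
def pvAliasTable : PySem.Dict String (PySem.Set String) :=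
  PySem.Dict.ofList [
    ("alarm.handle", PySem.Set.ofList ["alarm.ack", "alarm.close"]),
    ("alarm.ack", PySem.Set.ofList ["alarm.handle"]),
    ("alarm.close", PySem.Set.ofList ["alarm.handle"]),
    ("site.manage", PySem.Set.ofList ["site.create", "site.update"]),
    ("site.create", PySem.Set.ofList ["site.manage"]),
    ("site.update", PySem.Set.ofList ["site.manage"]),
    ("rule.view", PySem.Set.ofList ["alarm_rule.template.view", "alarm_rule.tenant.view"]),
    ("rule.manage", PySem.Set.ofList ["rule.view", "alarm_rule.template.view", "alarm_rule.template.manage", "alarm_rule.tenant.view", "alarm_rule.tenant.manage"]),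
    ("alarm_rule.template.view", PySem.Set.ofList ["rule.view"]),
    ("alarm_rule.tenant.view", PySem.Set.ofList ["rule.view"]),
    ("alarm_rule.template.manage", PySem.Set.ofList ["rule.manage", "rule.view"]),
    ("alarm_rule.tenant.manage", PySem.Set.ofList ["rule.manage", "rule.view"]),
    ("notify.view", PySem.Set.ofList ["notify.channel.view", "notify.policy.view", "notify.receiver.view", "notify.group.view", "notify.rule.view", "notify.oncall.view", "notify.push_log.view"]),
    ("notify.manage", PySem.Set.ofList ["notify.view", "notify.channel.view", "notify.channel.manage", "notify.policy.view", "notify.policy.manage", "notify.receiver.view", "notify.receiver.manage", "notify.group.view", "notify.group.manage", "notify.rule.view", "notify.rule.manage", "notify.oncall.view", "notify.oncall.manage", "notify.push_log.view", "notify.push_log.retry"]),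
    ("notify.channel.view", PySem.Set.ofList ["notify.view"]),
    ("notify.policy.view", PySem.Set.ofList ["notify.view"]),
    ("notify.receiver.view", PySem.Set.ofList ["notify.view"]),
    ("notify.group.view", PySem.Set.ofList ["notify.view"]),
    ("notify.rule.view", PySem.Set.ofList ["notify.view"]),
    ("notify.oncall.view", PySem.Set.ofList ["notify.view"]),
    ("notify.push_log.view", PySem.Set.ofList ["notify.view"]),
    ("notify.channel.manage", PySem.Set.ofList ["notify.manage", "notify.view"]),
    ("notify.policy.manage", PySem.Set.ofList ["notify.manage", "notify.view"]),
    ("notify.receiver.manage", PySem.Set.ofList ["notify.manage", "notify.view"]),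
    ("notify.group.manage", PySem.Set.ofList ["notify.manage", "notify.view"]),
    ("notify.rule.manage", PySem.Set.ofList ["notify.manage", "notify.view"]),
    ("notify.oncall.manage", PySem.Set.ofList ["notify.manage", "notify.view"]),
    ("notify.push_log.retry", PySem.Set.ofList ["notify.manage", "notify.view"]),
    ("user.manage_company", PySem.Set.ofList ["user.view", "user.manage", "audit.view"]),
    ("user.view", PySem.Set.ofList ["user.manage_company"]),
    ("user.manage", PySem.Set.ofList ["user.manage_company"])]

-- PERMISSION_ALIASES.get(key, set())
def pvAliasesOf (key : String) : PySem.Set String := PySem.Dict.getD pvAliasTable key []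

-- all strings occurring in PERMISSION_ALIASES values; only used to size A's fuel guard
def pvUniverse : List String := pvAliasTable.values.flatten

-- how many universe strings are still missing from s; only used to size A's fuel guard
def pvMissing (s : List String) : Nat := (pvUniverse.toFinset \ s.toFinset).card

-- one `for key in list(expanded)` pass of A's while-loop, with its `changed` flag
def pvPassA (s : PySem.Set String) : PySem.Set String × Bool :=
  s.foldl
    (fun st key =>
      let additions := pvAliasesOf key
      if PySem.Set.issubset additions st.1 then st
      else (PySem.Set.update st.1 additions, true))
    (s, false)

-- A's `while changed` loop; the fuel is a guard only: `pvMissing s + 1` rounds always reach the fixpoint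
def pvLoopA : Nat → PySem.Set String → List String
  | 0, s => s
  | fuel + 1, s =>
      let r := pvPassA s
      if r.2 then pvLoopA fuel r.1 else r.1

def expand_permissions (raw_permissions : List String) : List String :=
  let expanded := PySem.Set.ofList (raw_permissions.filter (fun item => item != ""))
  pvLoopA (pvMissing expanded + 1) expanded

-- ===== PORT B =====
-- ALIAS_GROUPS / ALIAS_GRAPH (B's module constants: alias groups flattened into an adjacency map)
def pvGroups : List (List String × List String) := [
    (["alarm.handle"],
     ["alarm.ack", "alarm.close"]),
    (["alarm.ack", "alarm.close"],
     ["alarm.handle"]),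
    (["site.manage"],
     ["site.create", "site.update"]),
    (["site.create", "site.update"],
     ["site.manage"]),
    (["rule.view"],
     ["alarm_rule.template.view", "alarm_rule.tenant.view"]),
    (["rule.manage"],
     ["rule.view", "alarm_rule.template.view", "alarm_rule.template.manage", "alarm_rule.tenant.view", "alarm_rule.tenant.manage"]),
    (["alarm_rule.template.view", "alarm_rule.tenant.view"],
     ["rule.view"]),
    (["alarm_rule.template.manage", "alarm_rule.tenant.manage"],
     ["rule.manage", "rule.view"]),
    (["notify.view"],
     ["notify.channel.view", "notify.policy.view", "notify.receiver.view", "notify.group.view", "notify.rule.view", "notify.oncall.view", "notify.push_log.view"]),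
    (["notify.manage"],
     ["notify.view", "notify.channel.view", "notify.channel.manage", "notify.policy.view", "notify.policy.manage", "notify.receiver.view", "notify.receiver.manage", "notify.group.view", "notify.group.manage", "notify.rule.view", "notify.rule.manage", "notify.oncall.view", "notify.oncall.manage", "notify.push_log.view", "notify.push_log.retry"]),
    (["notify.channel.view", "notify.policy.view", "notify.receiver.view", "notify.group.view", "notify.rule.view", "notify.oncall.view", "notify.push_log.view"],
     ["notify.view"]),
    (["notify.channel.manage", "notify.policy.manage", "notify.receiver.manage", "notify.group.manage", "notify.rule.manage", "notify.oncall.manage", "notify.push_log.retry"],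
     ["notify.manage", "notify.view"]),
    (["user.manage_company"],
     ["user.view", "user.manage", "audit.view"]),
    (["user.view", "user.manage"],
     ["user.manage_company"])]

def pvGraph : PySem.Dict String (List String) :=
  pvGroups.foldl
    (fun d g => g.1.foldl (fun d key => d.insert key g.2) d)
    PySem.Dict.empty

-- ALIAS_GRAPH.get(perm, ())
def pvNbrs (perm : String) : List String := PySem.Dict.getD pvGraph perm []

-- `for alias in ALIAS_GRAPH.get(perm, ()): if alias not in seen: seen.add(alias); nxt.append(alias)`
def pvVisit (st : PySem.Set String × List String) (perm : String) : PySem.Set String × List String :=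
  (pvNbrs perm).foldl
    (fun st al =>
      if !(PySem.Set.contains st.1 al) then (PySem.Set.add st.1 al, st.2 ++ [al])
      else st)
    st

-- number of alias occurrences in the graph; only used to size B's fuel guard
def pvGraphSpan : Nat := (pvGraph.values.flatten).length

-- B's `while frontier` loop; the fuel is a guard only: pvGraphSpan + 2 waves always drain the frontier
def pvWave : Nat → PySem.Set String → List String → List String
  | 0, seen, _ => seen
  | fuel + 1, seen, frontier =>
      if frontier.isEmpty then seen
      else
        let r := frontier.foldl pvVisit (seen, [])
        pvWave fuel r.1 r.2

def expand_permissions_alt (raw_permissions : List String) : List String :=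
  let init := raw_permissions.foldl
    (fun st item =>
      if item != "" && !(PySem.Set.contains st.1 item) then (PySem.Set.add st.1 item, st.2 ++ [item])
      else st)
    (PySem.Set.empty, [])
  pvWave (pvGraphSpan + 2) init.1 init.2

-- ===== PRECONDITION & SPEC =====
def Spec_expand_permissions (raw_permissions : List String) (out : List String) : Prop := out = expand_permissions_alt raw_permissions
instance (raw_permissions : List String) (out : List String) : Decidable (Spec_expand_permissions raw_permissions out) := by unfold Spec_expand_permissions; infer_instance

-- ===== CLAIM (what is proved, stated in full; the proofs are below) =====
def Claim_equal_expand_permissions : Prop := ∀ (raw_permissions : List String), Dom_expand_permissions raw_permissions → Spec_expand_permissions raw_permissions (expand_permissions raw_permissions)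

-- ===== LEMMAS AND PROOFS =====

-- the two alias tables are the same association list (B's tuples = A's sets, evaluated)
lemma pv_table_eq : pvGraph = pvAliasTable := by decide

lemma pv_nbrs_eq (k : String) : pvNbrs k = pvAliasesOf k := by
  unfold pvNbrs pvAliasesOf
  rw [pv_table_eq]

-- the state-transformer A's pass folds with (pvPassA s = s.foldl pvF (s, false) by rfl)
def pvF (st : PySem.Set String × Bool) (key : String) : PySem.Set String × Bool :=
  let additions := pvAliasesOf key
  if PySem.Set.issubset additions st.1 then st
  else (PySem.Set.update st.1 additions, true)

lemma pv_passA_eq (s : PySem.Set String) : pvPassA s = s.foldl pvF (s, false) := rfl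

-- the seen-set effect of visiting one permission
def pvStep (s : PySem.Set String) (k : String) : PySem.Set String :=
  PySem.Set.update s (pvAliasesOf k)

-- every alias value lives in pvUniverse
lemma pv_aliases_sub_universe (k a : String) (h : a ∈ pvAliasesOf k) : a ∈ pvUniverse := by
  unfold pvAliasesOf PySem.Dict.getD PySem.Dict.get? at h
  cases hf : List.find? (fun p => p.1 == k) pvAliasTable.items with
  | none => rw [hf] at h; simp at h
  | some p =>
    rw [hf] at h
    simp only [Option.map_some, Option.getD_some] at h
    have hp : p ∈ pvAliasTable.items := List.mem_of_find?_eq_some hf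
    unfold pvUniverse PySem.Dict.values
    rw [List.mem_flatten]
    exact ⟨p.2, List.mem_map_of_mem hp, h⟩

-- every alias list is duplicate-free
lemma pv_aliases_nodup (k : String) : (pvAliasesOf k).Nodup := by
  unfold pvAliasesOf PySem.Dict.getD PySem.Dict.get?
  cases hf : List.find? (fun p => p.1 == k) pvAliasTable.items with
  | none => simp
  | some p =>
    simp only [Option.map_some, Option.getD_some]
    have hp : p ∈ pvAliasTable.items := List.mem_of_find?_eq_some hf
    have hall : pvAliasTable.items.all (fun q => decide q.2.Nodup) = true := by decide
    rw [List.all_eq_true] at hall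
    exact of_decide_eq_true (hall p hp)

-- t extends s by fresh universe elements
def PvGrows (s t : List String) : Prop :=
  ∃ e, t = s ++ e ∧ e.Nodup ∧ ∀ x ∈ e, x ∉ s ∧ x ∈ pvUniverse

lemma pv_grows_rfl (s : List String) : PvGrows s s := ⟨[], by simp⟩

lemma pv_grows_trans {s t u : List String} (h1 : PvGrows s t) (h2 : PvGrows t u) : PvGrows s u := by
  obtain ⟨e1, rfl, hn1, hm1⟩ := h1
  obtain ⟨e2, rfl, hn2, hm2⟩ := h2
  refine ⟨e1 ++ e2, by simp, ?_, ?_⟩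
  · refine List.Nodup.append hn1 hn2 ?_
    intro x hx1 hx2
    exact (hm2 x hx2).1 (List.mem_append_right s hx1)
  · intro x hx
    rcases List.mem_append.1 hx with hx1 | hx2
    · exact hm1 x hx1
    · exact ⟨fun hs => (hm2 x hx2).1 (List.mem_append_left e1 hs), (hm2 x hx2).2⟩

lemma pv_grows_prefix {s t : List String} (h : PvGrows s t) : s <+: t := by
  obtain ⟨e, rfl, -, -⟩ := h; exact ⟨e, rfl⟩

lemma pv_grows_mem {s t : List String} (h : PvGrows s t) {x : String} (hx : x ∈ s) : x ∈ t :=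
  (pv_grows_prefix h).subset hx

lemma pv_grows_step (s : PySem.Set String) (k : String) : PvGrows s (pvStep s k) := by
  unfold pvStep
  rw [PySem.Set.update_eq_append_filter]
  refine ⟨_, rfl, (PySem.Set.nodup_ofList _).filter _, ?_⟩
  intro x hx
  obtain ⟨hmem, hcon⟩ := List.mem_filter.1 hx
  refine ⟨fun hxs => ?_, pv_aliases_sub_universe k x ((PySem.Set.mem_ofList _ _).1 hmem)⟩
  rw [(PySem.Set.contains_iff s x).2 hxs] at hcon
  simp at hcon

lemma pv_step_of_subset {s : PySem.Set String} {k : String}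
    (h : ∀ a ∈ pvAliasesOf k, a ∈ s) : pvStep s k = s := by
  unfold pvStep
  rw [PySem.Set.update_eq_append_filter]
  have hnil : List.filter (fun y => !s.contains y) (PySem.Set.ofList (pvAliasesOf k)) = [] := by
    rw [List.filter_eq_nil_iff]
    intro y hy
    rw [(PySem.Set.contains_iff s y).2 (h y ((PySem.Set.mem_ofList _ _).1 hy))]
    simp
  rw [hnil, List.append_nil]

lemma pv_grows_foldl (l : List String) (s : PySem.Set String) :
    PvGrows s (l.foldl pvStep s) := by
  induction l generalizing s with
  | nil => exact pv_grows_rfl s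
  | cons k l ih => exact pv_grows_trans (pv_grows_step s k) (ih (pvStep s k))

lemma pv_missing_lt {s t : List String} (h : PvGrows s t) (x : String)
    (hxt : x ∈ t) (hxs : x ∉ s) (hxU : x ∈ pvUniverse) : pvMissing t < pvMissing s := by
  unfold pvMissing
  have hsub : pvUniverse.toFinset \ t.toFinset ⊆ pvUniverse.toFinset \ s.toFinset := by
    refine Finset.sdiff_subset_sdiff (Finset.Subset.refl _) ?_
    intro y hy
    rw [List.mem_toFinset] at *
    exact pv_grows_mem h hy
  refine Finset.card_lt_card ((Finset.ssubset_iff_of_subset hsub).2 ⟨x, ?_, ?_⟩)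
  · simp [List.mem_toFinset, hxU, hxs]
  · simp [List.mem_toFinset, hxt]

lemma pv_missing_le_span (s : List String) : pvMissing s ≤ pvGraphSpan := by
  have h1 : pvMissing s ≤ pvUniverse.toFinset.card :=
    Finset.card_le_card (Finset.sdiff_subset)
  have h2 : pvUniverse.toFinset.card ≤ pvUniverse.length := List.toFinset_card_le _
  have h3 : pvGraphSpan = pvUniverse.length := by
    unfold pvGraphSpan pvUniverse
    rw [pv_table_eq]
  omega

-- pass lemmas
lemma pv_pass_fst (l : List String) : ∀ (s : PySem.Set String) (b : Bool),
    (l.foldl pvF (s, b)).1 = l.foldl pvStep s := by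
  induction l with
  | nil => intro s b; rfl
  | cons k l ih =>
    intro s b
    simp only [List.foldl_cons, pvF]
    by_cases hc : PySem.Set.issubset (pvAliasesOf k) s = true
    · rw [if_pos hc, pv_step_of_subset ((PySem.Set.issubset_iff _ _).1 hc)]
      exact ih s b
    · rw [if_neg hc]
      exact ih _ _

lemma pv_mem_aliases_foldl (l : List String) : ∀ (s : PySem.Set String) (k : String),
    k ∈ l → ∀ a ∈ pvAliasesOf k, a ∈ l.foldl pvStep s := by
  induction l with
  | nil => intro s k hk; exact absurd hk (by simp)
  | cons k' l ih =>
    intro s k hk a ha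
    simp only [List.foldl_cons]
    rcases List.mem_cons.1 hk with rfl | hk'
    · refine pv_grows_mem (pv_grows_foldl l (pvStep s k)) ?_
      unfold pvStep
      exact (PySem.Set.mem_update _ _ _).2 (Or.inr ha)
    · exact ih _ k hk' a ha

-- visiting one permission: the fold over its alias list appends exactly the fresh aliases
lemma pv_fold_fresh (l : List String) : ∀ (s : PySem.Set String) (nx : List String), l.Nodup →
    l.foldl
      (fun st al =>
        if !(PySem.Set.contains st.1 al) then (PySem.Set.add st.1 al, st.2 ++ [al])
        else st)
      (s, nx)
    = (s ++ l.filter (fun a => !(PySem.Set.contains s a)),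
       nx ++ l.filter (fun a => !(PySem.Set.contains s a))) := by
  induction l with
  | nil => intro s nx _; simp
  | cons a l ih =>
    intro s nx hnd
    obtain ⟨hna, hndl⟩ := List.nodup_cons.1 hnd
    simp only [List.foldl_cons, List.filter_cons]
    by_cases hc : PySem.Set.contains s a = true
    · simp only [hc, Bool.not_true, Bool.false_eq_true, if_false]
      exact ih s nx hndl
    · have hc' : (!PySem.Set.contains s a) = true := by
        cases h : PySem.Set.contains s a
        · rfl
        · exact absurd h hc
      simp only [hc', if_pos]
      have hadd : PySem.Set.add s a = s ++ [a] :=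
        PySem.Set.add_of_not_mem (fun hm => hc ((PySem.Set.contains_iff s a).2 hm))
      rw [hadd, ih (s ++ [a]) (nx ++ [a]) hndl]
      have hfilt : l.filter (fun x => !(PySem.Set.contains (s ++ [a]) x))
          = l.filter (fun x => !(PySem.Set.contains s x)) := by
        apply List.filter_congr
        intro x hx
        have hxa : x ≠ a := fun h => hna (h ▸ hx)
        by_cases hxs : PySem.Set.contains s x = true
        · have : PySem.Set.contains (s ++ [a]) x = true :=
            (PySem.Set.contains_iff _ x).2 (List.mem_append_left _ ((PySem.Set.contains_iff s x).1 hxs))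
          rw [this, hxs]
        · have : PySem.Set.contains (s ++ [a]) x ≠ true := by
            intro hmem
            rcases List.mem_append.1 ((PySem.Set.contains_iff _ x).1 hmem) with h1 | h2
            · exact hxs ((PySem.Set.contains_iff s x).2 h1)
            · exact hxa (List.mem_singleton.1 h2)
          have h1 : PySem.Set.contains (s ++ [a]) x = false := Bool.eq_false_iff.mpr this
          have h2 : PySem.Set.contains s x = false := Bool.eq_false_iff.mpr hxs
          rw [h1, h2]
      rw [hfilt]
      simp [List.append_assoc]

lemma pv_visit_eq (s : PySem.Set String) (nx : List String) (k : String) :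
    pvVisit (s, nx) k
      = (pvStep s k, nx ++ (pvAliasesOf k).filter (fun a => !(PySem.Set.contains s a))) := by
  unfold pvVisit
  rw [pv_nbrs_eq, pv_fold_fresh _ _ _ (pv_aliases_nodup k)]
  unfold pvStep
  rw [PySem.Set.update_eq_append_filter,
      PySem.Set.ofList_eq_self_of_nodup _ (pv_aliases_nodup k)]

-- fresh aliases empty ↔ A's subset test
lemma pv_filter_empty_iff (l : List String) (s : PySem.Set String) :
    l.filter (fun a => !(PySem.Set.contains s a)) = [] ↔ PySem.Set.issubset l s = true := by
  rw [List.filter_eq_nil_iff, PySem.Set.issubset_iff]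
  constructor
  · intro h a ha
    have hb := h a ha
    cases hcase : PySem.Set.contains s a
    · exact absurd (by rw [hcase]; rfl) hb
    · exact (PySem.Set.contains_iff s a).1 hcase
  · intro h a ha
    rw [(PySem.Set.contains_iff s a).2 (h a ha)]
    simp

-- one frontier-fold against one pass-fold: same seen set, flag ↔ something fresh, frontier = the fresh suffix
lemma pv_pair (q : List String) : ∀ (s : PySem.Set String) (nx : List String) (b : Bool),
    ∃ e, q.foldl pvVisit (s, nx) = (s ++ e, nx ++ e)
      ∧ q.foldl pvF (s, b) = (s ++ e, b || !e.isEmpty)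
      ∧ PvGrows s (s ++ e) := by
  induction q with
  | nil => intro s nx b; exact ⟨[], by simp, by simp, by rw [List.append_nil]; exact pv_grows_rfl s⟩
  | cons k q ih =>
    intro s nx b
    simp only [List.foldl_cons]
    by_cases hc : PySem.Set.issubset (pvAliasesOf k) s = true
    · have hfe : (pvAliasesOf k).filter (fun a => !(PySem.Set.contains s a)) = [] :=
        (pv_filter_empty_iff _ s).2 hc
      have hv : pvVisit (s, nx) k = (s, nx) := by
        rw [pv_visit_eq, pv_step_of_subset ((PySem.Set.issubset_iff _ _).1 hc), hfe,
            List.append_nil]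
      have hf : pvF (s, b) k = (s, b) := by
        simp only [pvF]; rw [if_pos hc]
      rw [hv, hf]
      exact ih s nx b
    · set f := (pvAliasesOf k).filter (fun a => !(PySem.Set.contains s a)) with hfdef
      have hfne : f ≠ [] := by
        intro h
        exact hc ((pv_filter_empty_iff _ s).1 h)
      have hstep : pvStep s k = s ++ f := by
        unfold pvStep
        rw [PySem.Set.update_eq_append_filter,
            PySem.Set.ofList_eq_self_of_nodup _ (pv_aliases_nodup k), hfdef]
      have hv : pvVisit (s, nx) k = (s ++ f, nx ++ f) := by
        rw [pv_visit_eq, hstep]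
      have hf : pvF (s, b) k = (s ++ f, true) := by
        simp only [pvF]
        rw [if_neg hc, ← hstep]
        unfold pvStep
        rfl
      rw [hv, hf]
      obtain ⟨e', hv', hf', hg'⟩ := ih (s ++ f) (nx ++ f) true
      refine ⟨f ++ e', ?_, ?_, ?_⟩
      · rw [hv']; simp [List.append_assoc]
      · rw [hf']
        have hne2 : (f ++ e') ≠ [] := fun hh => hfne (List.append_eq_nil_iff.1 hh).1
        have hemp : (f ++ e').isEmpty = false := by
          rw [Bool.eq_false_iff]
          intro hh
          exact hne2 (List.isEmpty_iff.1 hh)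
        rw [hemp]
        simp [List.append_assoc]
      · have hgf : PvGrows s (s ++ f) := by rw [← hstep]; exact pv_grows_step s k
        rw [← List.append_assoc]
        exact pv_grows_trans hgf hg'

-- a closed prefix contributes nothing to A's pass
lemma pv_skip (p : List String) : ∀ (s : PySem.Set String) (b : Bool),
    (∀ k ∈ p, ∀ a ∈ pvAliasesOf k, a ∈ s) → p.foldl pvF (s, b) = (s, b) := by
  induction p with
  | nil => intro s b _; rfl
  | cons k p ih =>
    intro s b h
    simp only [List.foldl_cons, pvF]
    rw [if_pos ((PySem.Set.issubset_iff _ _).2 (h k List.mem_cons_self))]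
    exact ih s b (fun k' hk' => h k' (List.mem_cons_of_mem k hk'))

-- main correspondence: A's fixpoint loop = B's wave loop, given the non-frontier part is closed
lemma pv_main : ∀ (fa : Nat) (s : PySem.Set String) (q p : List String) (fb : Nat),
    pvMissing s < fa → pvMissing s + 2 ≤ fb →
    s = p ++ q → (∀ k ∈ p, ∀ a ∈ pvAliasesOf k, a ∈ s) →
    pvLoopA fa s = pvWave fb s q := by
  intro fa
  induction fa with
  | zero => intro s q p fb hfa _ _ _; omega
  | succ fa ih =>
    intro s q p fb hfa hfb hsplit hcl
    obtain ⟨fb', rfl⟩ : ∃ fb', fb = fb' + 1 := ⟨fb - 1, by omega⟩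
    have hpass : pvPassA s = (p ++ q).foldl pvF (s, false) := by
      rw [pv_passA_eq, ← hsplit]
    obtain ⟨e, hv, hf, hg⟩ := pv_pair q s [] false
    have hpass2 : pvPassA s = (s ++ e, !e.isEmpty) := by
      rw [hpass, List.foldl_append, pv_skip p s false hcl, hf]
      simp
    simp only [pvLoopA, pvWave]
    by_cases hq : q.isEmpty = true
    · rw [if_pos hq]
      have hq' : q = [] := List.isEmpty_iff.1 hq
      have he : e = [] := by
        subst hq'
        simp only [List.foldl_nil, List.nil_append] at hv
        exact (Prod.mk.injEq _ _ _ _ ▸ hv).2.symm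
      rw [hpass2, he]
      simp
    · rw [if_neg hq, hv]
      by_cases he : e.isEmpty = true
      · have he' : e = [] := List.isEmpty_iff.1 he
        rw [hpass2, he']
        simp only [List.isEmpty_nil, Bool.not_true, Bool.false_eq_true, if_false,
          List.append_nil]
        obtain ⟨fb'', rfl⟩ : ∃ fb'', fb' = fb'' + 1 := ⟨fb' - 1, by omega⟩
        simp [pvWave]
      · have hene : e ≠ [] := fun h => by subst h; simp at he
        rw [hpass2]
        simp only [he, Bool.not_false, if_pos, List.nil_append]
        -- a fresh element drives the measure down
        obtain ⟨x, hx⟩ := List.exists_mem_of_ne_nil e hene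
        have hlt : pvMissing (s ++ e) < pvMissing s := by
          have hg2 := hg
          obtain ⟨e0, heq, -, hfresh⟩ := hg2
          have he0 : e = e0 := List.append_cancel_left heq
          have hxf := hfresh x (he0 ▸ hx)
          exact pv_missing_lt hg x (List.mem_append_right s hx) hxf.1 hxf.2
        refine ih (s ++ e) e s fb' (by omega) (by omega) rfl ?_
        intro k hk a ha
        have hfold : s ++ e = q.foldl pvStep s := by
          have h1 := pv_pass_fst q s false
          rw [hf] at h1
          exact h1
        rcases List.mem_append.1 (hsplit ▸ hk : k ∈ p ++ q) with hkp | hkq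
        · exact List.mem_append_left e (hcl k hkp a ha)
        · rw [hfold]
          exact pv_mem_aliases_foldl q s k hkq a ha

-- B's seeding pass produces the same list twice, and it is A's deduplicated filter
lemma pv_init (xs : List String) : ∀ (s : PySem.Set String),
    xs.foldl
      (fun st item =>
        if item != "" && !(PySem.Set.contains st.1 item) then (PySem.Set.add st.1 item, st.2 ++ [item])
        else st)
      (s, s)
    = ((xs.filter (fun i => i != "")).foldl PySem.Set.add s,
       (xs.filter (fun i => i != "")).foldl PySem.Set.add s) := by
  induction xs with
  | nil => intro s; simp
  | cons x xs ih =>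
    intro s
    simp only [List.foldl_cons, List.filter_cons]
    by_cases hne : (x != "") = true
    · simp only [hne, if_pos, Bool.true_and]
      by_cases hc : PySem.Set.contains s x = true
      · simp only [hc, Bool.not_true, Bool.false_eq_true, if_false]
        rw [List.foldl_cons, PySem.Set.add_of_mem ((PySem.Set.contains_iff s x).1 hc)]
        exact ih s
      · have hc' : (!PySem.Set.contains s x) = true := by
          cases h : PySem.Set.contains s x
          · rfl
          · exact absurd h hc
        simp only [hc', if_pos]
        have hadd : PySem.Set.add s x = s ++ [x] :=
          PySem.Set.add_of_not_mem (fun hm => hc ((PySem.Set.contains_iff s x).2 hm))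
        rw [List.foldl_cons, hadd]
        exact ih (s ++ [x])
    · simp only [hne, Bool.false_and, Bool.false_eq_true, if_false]
      exact ih s

-- ===== VERDICT (by name: the statement is the Claim_ definition above) =====
theorem expand_permissions_spec : Claim_equal_expand_permissions := by
  intro raw _
  unfold Spec_expand_permissions expand_permissions expand_permissions_alt
  have hinit :
      raw.foldl
        (fun st item =>
          if item != "" && !(PySem.Set.contains st.1 item) then (PySem.Set.add st.1 item, st.2 ++ [item])
          else st)
        (PySem.Set.empty, [])
      = ((raw.filter (fun i => i != "")).foldl PySem.Set.add PySem.Set.empty,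
         (raw.filter (fun i => i != "")).foldl PySem.Set.add PySem.Set.empty) := pv_init raw PySem.Set.empty
  simp only [hinit]
  exact pv_main (pvMissing (PySem.Set.ofList (raw.filter (fun item => item != ""))) + 1)
      (PySem.Set.ofList (raw.filter (fun item => item != "")))
      (PySem.Set.ofList (raw.filter (fun item => item != ""))) [] (pvGraphSpan + 2)
      (Nat.lt_succ_self _)
      (by
        have h := pv_missing_le_span (PySem.Set.ofList (raw.filter (fun item => item != "")))
        omega)
      rfl
      (by intro k hk; exact absurd hk (by simp))
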